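-- pv_equiv track=rewrite | github.com/retospect/precis-summary | src/precis_summary/ranking.py | pick_best_summary
-- ===== SOURCE A (Python) =====
-- SUMMARY_PRIORITY: list[str] = [
--     "llm:",
--     "rake",
-- ]
--
-- def pick_best_summary(summaries: dict[str, str] | None) -> str:
--     """Pick the highest-ranked summary from a summaries dict.
--
--     Args:
--         summaries: Dict mapping profile key to summary text.
--             Example: {"rake": "...", "llm:qwen3.5:9b": "..."}
--
--     Returns:
--         Best available summary text, or empty string if none.
--     """
--     if not summaries:
--         return ""
--
--     for prefix in SUMMARY_PRIORITY:
--         for key, val in summaries.items():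
--             if key.startswith(prefix) and val:
--                 return val
--
--     # Fallback: return first non-empty value
--     for val in summaries.values():
--         if val:
--             return val
--
--     return ""
-- ===== SOURCE B (Python) =====
-- SUMMARY_PRIORITY: list[str] = [
--     "llm:",
--     "rake",
-- ]
--
-- def _rank(key: str) -> int:
--     for i, prefix in enumerate(SUMMARY_PRIORITY):
--         if key.startswith(prefix):
--             return i
--     return len(SUMMARY_PRIORITY)
--
-- def pick_best_summary(summaries: dict[str, str] | None) -> str:
--     if not summaries:
--         return ""
--     best = None  # (rank, value); first occurrence wins on equal rank
--     for key, val in summaries.items():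
--         if val:
--             r = _rank(key)
--             if best is None or r < best[0]:
--                 best = (r, val)
--     return best[1] if best is not None else ""
-- ===== Notes on version B (the rewrite author's own statement) =====
-- stated objective: alternative
-- what changed: Replaces the per-priority nested scans plus a fallback scan with a single pass that ranks each key once and keeps the running (rank, first-occurrence) minimum.
import Mathlib
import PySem

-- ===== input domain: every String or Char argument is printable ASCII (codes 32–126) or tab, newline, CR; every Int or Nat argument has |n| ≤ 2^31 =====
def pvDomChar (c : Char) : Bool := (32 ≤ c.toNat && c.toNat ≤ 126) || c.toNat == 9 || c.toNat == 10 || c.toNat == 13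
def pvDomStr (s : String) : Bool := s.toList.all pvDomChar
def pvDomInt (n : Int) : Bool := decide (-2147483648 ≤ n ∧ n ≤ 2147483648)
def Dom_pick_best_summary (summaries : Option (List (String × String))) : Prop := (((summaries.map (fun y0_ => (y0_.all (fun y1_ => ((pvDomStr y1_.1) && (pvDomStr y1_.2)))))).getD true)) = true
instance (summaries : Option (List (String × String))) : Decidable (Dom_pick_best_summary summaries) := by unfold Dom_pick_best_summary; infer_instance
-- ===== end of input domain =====

-- B replaces A's per-priority nested scans plus fallback scan with a single pass
-- keeping the running (rank, first-occurrence) minimum; objective: alternative (same cost class).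

def SUMMARY_PRIORITY : List String := ["llm:", "rake"]

-- ===== PORT A =====
-- the two nested loops: for each prefix in order, first (key, val) with key.startswith(prefix) and truthy val
def pick_best_summary (summaries : Option (List (String × String))) : String :=
  match summaries with
  | none => ""
  | some xs =>
    if xs = [] then ""  -- `if not summaries` also catches the empty dict
    else
      match SUMMARY_PRIORITY.findSome? (fun pre =>
        (xs.find? (fun kv => PySem.Str.startswith kv.1 pre && kv.2 != "")).map (·.2)) with
      | some v => v
      | none =>
        -- Fallback: return first non-empty value
        match xs.find? (fun kv => kv.2 != "") with
        | some kv => kv.2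
        | none => ""

-- ===== PORT B =====
-- index of the first SUMMARY_PRIORITY prefix `key` starts with, else len(SUMMARY_PRIORITY)
def rankB (key : String) : Nat :=
  (SUMMARY_PRIORITY.findIdx? (fun pre => PySem.Str.startswith key pre)).getD SUMMARY_PRIORITY.length

-- body of B's single loop: keep the (rank, value) minimum, first occurrence wins on ties
def stepB (best : Option (Nat × String)) (kv : String × String) : Option (Nat × String) :=
  if kv.2 != "" then
    let r := rankB kv.1
    match best with
    | none => some (r, kv.2)
    | some b => if r < b.1 then some (r, kv.2) else some b
  else best

def pick_best_summary_alt (summaries : Option (List (String × String))) : String :=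
  match summaries with
  | none => ""
  | some xs =>
    if xs = [] then ""
    else
      match xs.foldl stepB none with
      | some b => b.2
      | none => ""

-- ===== PRECONDITION & SPEC =====
def Spec_pick_best_summary (summaries : Option (List (String × String))) (out : String) : Prop := out = pick_best_summary_alt summaries
instance (summaries : Option (List (String × String))) (out : String) : Decidable (Spec_pick_best_summary summaries out) := by unfold Spec_pick_best_summary; infer_instance

-- ===== CLAIM (what is proved, stated in full; the proofs are below) =====
def Claim_equal_pick_best_summary : Prop := ∀ (summaries : Option (List (String × String))), Dom_pick_best_summary summaries → Spec_pick_best_summary summaries (pick_best_summary summaries)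

-- ===== LEMMAS AND PROOFS =====

theorem rankB_eq (k : String) :
    rankB k = if PySem.Str.startswith k "llm:" then 0
              else if PySem.Str.startswith k "rake" then 1 else 2 := by
  simp only [rankB, SUMMARY_PRIORITY, List.findIdx?_cons, List.findIdx?_nil]
  simp only [PySem.Str.startswith_eq]
  by_cases h1 : PySem.Chars.startswith k.toList ['l', 'l', 'm', ':'] = true <;>
    by_cases h2 : PySem.Chars.startswith k.toList ['r', 'a', 'k', 'e'] = true <;>
      simp [h1, h2]

-- once an element of rank 0 has been kept, the fold never changes it
theorem foldl_stepB_rank0 (xs : List (String × String)) (v : String) :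
    xs.foldl stepB (some (0, v)) = some (0, v) := by
  induction xs with
  | nil => rfl
  | cons e t ih =>
    simp only [List.foldl_cons, stepB]
    split
    · simp [ih]
    · exact ih

-- with a rank-1 best in hand, only a rank-0 element can replace it
theorem foldl_stepB_rank1 (xs : List (String × String)) (v : String) :
    xs.foldl stepB (some (1, v)) =
      match xs.find? (fun e => rankB e.1 == 0 && e.2 != "") with
      | some e => some (0, e.2)
      | none => some (1, v) := by
  induction xs with
  | nil => rfl
  | cons e t ih =>
    by_cases hne : (e.2 != "") = true
    · by_cases h0 : rankB e.1 = 0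
      · simp only [List.foldl_cons, stepB, hne, if_pos, h0]
        simp [foldl_stepB_rank0, List.find?_cons, h0, hne]
      · have : ¬ rankB e.1 < 1 := by omega
        simp only [List.foldl_cons, stepB, hne, if_pos]
        simp only [this, if_neg, not_false_iff]
        rw [ih]
        simp [List.find?_cons, h0, hne]
    · have hne' : (e.2 != "") = false := by revert hne; cases (e.2 != "") <;> simp
      simp only [List.foldl_cons, stepB, hne', Bool.false_eq_true, if_false]
      rw [ih]
      simp [List.find?_cons, hne']

-- with a rank-2 best in hand, a rank-0 or rank-1 element can replace it
theorem foldl_stepB_rank2 (xs : List (String × String)) (v : String) :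
    xs.foldl stepB (some (2, v)) =
      match xs.find? (fun e => rankB e.1 == 0 && e.2 != "") with
      | some e => some (0, e.2)
      | none =>
        match xs.find? (fun e => rankB e.1 == 1 && e.2 != "") with
        | some e => some (1, e.2)
        | none => some (2, v) := by
  induction xs with
  | nil => rfl
  | cons e t ih =>
    by_cases hne : (e.2 != "") = true
    · by_cases h0 : rankB e.1 = 0
      · simp only [List.foldl_cons, stepB, hne, if_pos, h0]
        simp [foldl_stepB_rank0, List.find?_cons, h0, hne]
      · by_cases h1 : rankB e.1 = 1
        · simp only [List.foldl_cons, stepB, hne, if_pos, h1]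
          simp only [show (1:Nat) < 2 by omega, if_pos]
          rw [foldl_stepB_rank1]
          simp [List.find?_cons, h0, h1, hne]
        · have : ¬ rankB e.1 < 2 := by omega
          simp only [List.foldl_cons, stepB, hne, if_pos]
          simp only [this, if_neg, not_false_iff]
          rw [ih]
          simp [List.find?_cons, h0, h1, hne]
    · have hne' : (e.2 != "") = false := by revert hne; cases (e.2 != "") <;> simp
      simp only [List.foldl_cons, stepB, hne', Bool.false_eq_true, if_false]
      rw [ih]
      simp [List.find?_cons, hne']

-- characterisation of B's whole pass by the three rank classes
theorem foldl_stepB_none (xs : List (String × String)) :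
    xs.foldl stepB none =
      match xs.find? (fun e => rankB e.1 == 0 && e.2 != "") with
      | some e => some (0, e.2)
      | none =>
        match xs.find? (fun e => rankB e.1 == 1 && e.2 != "") with
        | some e => some (1, e.2)
        | none =>
          match xs.find? (fun e => rankB e.1 == 2 && e.2 != "") with
          | some e => some (2, e.2)
          | none => none := by
  induction xs with
  | nil => rfl
  | cons e t ih =>
    by_cases hne : (e.2 != "") = true
    · have hr : rankB e.1 = 0 ∨ rankB e.1 = 1 ∨ rankB e.1 = 2 := by
        rw [rankB_eq]; split_ifs <;> simp
      simp only [List.foldl_cons, stepB, hne, if_pos]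
      rcases hr with h | h | h
      · simp [h, foldl_stepB_rank0, List.find?_cons, hne]
      · rw [h, foldl_stepB_rank1]
        simp [List.find?_cons, h, hne]
      · rw [h, foldl_stepB_rank2]
        simp [List.find?_cons, h, hne]
    · have hne' : (e.2 != "") = false := by revert hne; cases (e.2 != "") <;> simp
      simp only [List.foldl_cons, stepB, hne', Bool.false_eq_true, if_false]
      rw [ih]
      simp [List.find?_cons, hne']

theorem find?_congr_mem {α : Type} (p q : α → Bool) (xs : List α)
    (h : ∀ a ∈ xs, p a = q a) : xs.find? p = xs.find? q := by
  induction xs with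
  | nil => rfl
  | cons e t ih =>
    have he := h e (by simp)
    simp only [List.find?_cons, he]
    split
    · rfl
    · exact ih fun a ha => h a (by simp [ha])

theorem pick_best_summary_spec' (summaries : Option (List (String × String))) :
    pick_best_summary summaries = pick_best_summary_alt summaries := by
  match summaries with
  | none => rfl
  | some xs =>
    by_cases hnil : xs = []
    · simp [pick_best_summary, pick_best_summary_alt, hnil]
    · simp only [pick_best_summary, pick_best_summary_alt, hnil, if_neg, not_false_iff]
      rw [foldl_stepB_none]
      have h0 : (xs.find? (fun kv => PySem.Str.startswith kv.1 "llm:" && kv.2 != ""))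
          = xs.find? (fun e => rankB e.1 == 0 && e.2 != "") := by
        apply find?_congr_mem
        intro a _
        rw [rankB_eq]; split_ifs <;> simp_all
      simp only [SUMMARY_PRIORITY, List.findSome?_cons, List.findSome?_nil, h0]
      cases hf0 : xs.find? (fun e => rankB e.1 == 0 && e.2 != "") with
      | some e => simp
      | none =>
        have hnone0 : ∀ a ∈ xs, ¬(rankB a.1 = 0 ∧ (a.2 != "") = true) := by
          intro a ha hc
          have := List.find?_eq_none.mp hf0 a ha
          simp [hc.1, hc.2] at this
        have h1 : (xs.find? (fun kv => PySem.Str.startswith kv.1 "rake" && kv.2 != ""))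
            = xs.find? (fun e => rankB e.1 == 1 && e.2 != "") := by
          apply find?_congr_mem
          intro a ha
          have hna := hnone0 a ha
          rw [rankB_eq] at hna ⊢
          cases hs0 : PySem.Str.startswith a.1 "llm:" <;>
            cases hs1 : PySem.Str.startswith a.1 "rake" <;>
              cases hne : (a.2 != "") <;> simp_all
        simp only [h1]
        cases hf1 : xs.find? (fun e => rankB e.1 == 1 && e.2 != "") with
        | some e => simp
        | none =>
          have hnone1 : ∀ a ∈ xs, ¬(rankB a.1 = 1 ∧ (a.2 != "") = true) := by
            intro a ha hc
            have := List.find?_eq_none.mp hf1 a ha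
            simp [hc.1, hc.2] at this
          have h2 : (xs.find? (fun kv => kv.2 != ""))
              = xs.find? (fun e => rankB e.1 == 2 && e.2 != "") := by
            apply find?_congr_mem
            intro a ha
            have hn0 := hnone0 a ha
            have hn1 := hnone1 a ha
            by_cases hne : (a.2 != "") = true
            · have hr : rankB a.1 = 0 ∨ rankB a.1 = 1 ∨ rankB a.1 = 2 := by
                rw [rankB_eq]; split_ifs <;> simp
              rcases hr with h | h | h
              · exact absurd ⟨h, hne⟩ hn0
              · exact absurd ⟨h, hne⟩ hn1
              · simp [h, hne]
            · simp [hne]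
          simp only [h2]
          cases hf2 : xs.find? (fun e => rankB e.1 == 2 && e.2 != "") with
          | some e => simp
          | none => simp

-- ===== VERDICT (by name: the statement is the Claim_ definition above) =====
theorem pick_best_summary_spec : Claim_equal_pick_best_summary := by
  intro summaries _
  unfold Spec_pick_best_summary
  exact pick_best_summary_spec' summaries
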